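-- pv_equiv track=rewrite | github.com/mzz235711/CMDA | mscn/util.py | get_all_names_predicates
-- ===== SOURCE A (Python) =====
-- def get_all_names_predicates(predicates):
--     columns = []
--     operators = []
--     for query in predicates:
--         for predicate in query:
--             if len(predicate) == 3:
--                 col = predicate[0]
--                 op = predicate[1]
--                 if col not in columns:
--                     columns.append(col)
--                 if op not in operators:
--                     operators.append(op)
--     return columns, operators
-- ===== SOURCE B (Python) =====
-- def _nub(xs):
--     # distinct elements in first-seen order, by repeatedly taking the head
--     # and filtering all its later occurrences out of the remainder
--     out = []
--     while xs:
--         h = xs[0]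
--         out.append(h)
--         xs = [x for x in xs[1:] if x != h]
--     return out
--
-- def get_all_names_predicates(predicates):
--     triples = [p for q in predicates for p in q if len(p) == 3]
--     return _nub([p[0] for p in triples]), _nub([p[1] for p in triples])
-- ===== Notes on version B (the rewrite author's own statement) =====
-- stated objective: alternative
-- what changed: Flattens the length-3 predicates once with comprehensions, then deduplicates each projection by a head-and-filter recurrence (take the first element, filter all its later occurrences out, repeat), so there is no seen-accumulator membership test at all.
import Mathlib
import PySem

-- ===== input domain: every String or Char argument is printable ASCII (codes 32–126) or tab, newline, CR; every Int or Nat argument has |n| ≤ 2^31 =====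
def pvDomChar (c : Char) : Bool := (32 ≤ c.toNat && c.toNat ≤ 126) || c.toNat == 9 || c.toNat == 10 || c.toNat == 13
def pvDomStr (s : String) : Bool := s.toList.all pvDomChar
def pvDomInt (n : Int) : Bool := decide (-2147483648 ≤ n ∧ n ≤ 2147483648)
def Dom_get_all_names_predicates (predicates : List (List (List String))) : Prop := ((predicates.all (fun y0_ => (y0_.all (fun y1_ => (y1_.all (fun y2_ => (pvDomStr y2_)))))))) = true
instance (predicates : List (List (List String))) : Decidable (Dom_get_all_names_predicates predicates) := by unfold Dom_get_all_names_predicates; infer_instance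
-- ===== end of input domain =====

-- B flattens the length-3 predicates once and deduplicates each projection by a
-- head-and-filter recurrence (take the head, filter its later occurrences out,
-- repeat), with no seen-accumulator membership test; objective: alternative.

-- ===== PORT A =====
-- one step of A's inner loop body: state is (columns, operators)
def pvStepA (st : List String × List String) (p : List String) : List String × List String :=
  if p.length == 3 then
    let col := (PySem.List.pyGet? p 0).getD ""   -- p[0]; len(p) == 3 guarantees in range
    let op := (PySem.List.pyGet? p 1).getD ""    -- p[1]; in range likewise
    let cols := if st.1.contains col then st.1 else st.1 ++ [col]
    let ops := if st.2.contains op then st.2 else st.2 ++ [op]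
    (cols, ops)
  else st

def get_all_names_predicates (predicates : List (List (List String))) : List String × List String :=
  predicates.foldl (fun st query => query.foldl pvStepA st) ([], [])

-- ===== PORT B =====
-- the while loop of Source B's _nub, as its obvious structural recursion
def pvNub (xs : List String) : List String :=
  match xs with
  | [] => []
  | h :: t => h :: pvNub (t.filter (fun x => !(x == h)))
termination_by xs.length
decreasing_by simpa using Nat.lt_succ_of_le (le_trans (List.length_filter_le _ t.attach) (by simp))

-- triples = [p for q in predicates for p in q if len(p) == 3]
def pvTriples (predicates : List (List (List String))) : List (List String) :=
  predicates.flatMap (fun q => q.filter (fun p => p.length == 3))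

def get_all_names_predicates_alt (predicates : List (List (List String))) : List String × List String :=
  let triples := pvTriples predicates
  (pvNub (triples.map (fun p => (PySem.List.pyGet? p 0).getD "")),
   pvNub (triples.map (fun p => (PySem.List.pyGet? p 1).getD "")))

-- ===== PRECONDITION & SPEC =====
def Spec_get_all_names_predicates (predicates : List (List (List String))) (out : List String × List String) : Prop := out = get_all_names_predicates_alt predicates
instance (predicates : List (List (List String))) (out : List String × List String) : Decidable (Spec_get_all_names_predicates predicates out) := by unfold Spec_get_all_names_predicates; infer_instance

-- ===== CLAIM (what is proved, stated in full; the proofs are below) =====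
def Claim_equal_get_all_names_predicates : Prop := ∀ (predicates : List (List (List String))), Dom_get_all_names_predicates predicates → Spec_get_all_names_predicates predicates (get_all_names_predicates predicates)

-- ===== LEMMAS AND PROOFS =====

-- the "append if not member" insertion A performs
def pvIns (acc : List String) (x : String) : List String :=
  if acc.contains x then acc else acc ++ [x]

lemma pvStepA_eq (st : List String × List String) (p : List String) :
    pvStepA st p =
      if p.length == 3 then
        (pvIns st.1 ((PySem.List.pyGet? p 0).getD ""), pvIns st.2 ((PySem.List.pyGet? p 1).getD ""))
      else st := rfl

-- A's inner loop over one query, split into two independent insertion folds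
lemma pvInner (q : List (List String)) (cs os : List String) :
    q.foldl pvStepA (cs, os) =
      (((q.filter (fun p => p.length == 3)).map (fun p => (PySem.List.pyGet? p 0).getD "")).foldl pvIns cs,
       ((q.filter (fun p => p.length == 3)).map (fun p => (PySem.List.pyGet? p 1).getD "")).foldl pvIns os) := by
  induction q generalizing cs os with
  | nil => rfl
  | cons p q ih =>
    by_cases h : p.length = 3
    · simp [List.foldl_cons, pvStepA_eq, h, ih]
    · simp [List.foldl_cons, pvStepA_eq, h, ih]

-- A's outer loop equals the insertion folds over the flattened length-3 predicates
lemma pvOuter (predicates : List (List (List String))) (cs os : List String) :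
    predicates.foldl (fun st query => query.foldl pvStepA st) (cs, os) =
      (((pvTriples predicates).map (fun p => (PySem.List.pyGet? p 0).getD "")).foldl pvIns cs,
       ((pvTriples predicates).map (fun p => (PySem.List.pyGet? p 1).getD "")).foldl pvIns os) := by
  induction predicates generalizing cs os with
  | cons q rest ih =>
    simp only [List.foldl_cons, pvInner, ih, pvTriples, List.flatMap_cons, List.map_append,
      List.foldl_append]
  | nil => rfl

-- the insertion fold equals acc ++ head-and-filter dedup of the unseen elements
lemma pvFoldl_ins_eq_nub_aux : ∀ (n : Nat) (xs : List String), xs.length = n → ∀ (acc : List String),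
    xs.foldl pvIns acc = acc ++ pvNub (xs.filter (fun x => !acc.contains x)) := by
  intro n
  induction n using Nat.strong_induction_on with
  | _ n ih =>
    intro xs hlen acc
    match xs, hlen with
    | [], _ => simp [pvNub]
    | h :: t, hlen =>
      have ht : t.length < n := by simp at hlen; omega
      by_cases hm : h ∈ acc
      · have h1 : pvIns acc h = acc := by simp [pvIns, hm]
        have h2 : (h :: t).filter (fun x => !acc.contains x)
            = t.filter (fun x => !acc.contains x) := by simp [hm]
        rw [List.foldl_cons, h1, h2]
        exact ih t.length ht t rfl acc
      · have hins : pvIns acc h = acc ++ [h] := by simp [pvIns, hm]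
        rw [List.foldl_cons, hins, ih t.length ht t rfl (acc ++ [h])]
        have hfil : t.filter (fun x => !(acc ++ [h]).contains x)
            = (t.filter (fun x => !acc.contains x)).filter (fun x => !(x == h)) := by
          rw [List.filter_filter]
          apply List.filter_congr
          intro x _
          simp only [List.contains_append, Bool.not_or, List.contains_cons,
            List.contains_nil, Bool.or_false]
          rw [Bool.and_comm]
        have h3 : (h :: t).filter (fun x => !acc.contains x)
            = h :: t.filter (fun x => !acc.contains x) := by
          simp [hm]
        rw [h3, pvNub, ← hfil]
        simp

lemma pvFoldl_ins_eq_nub (xs : List String) (acc : List String) :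
    xs.foldl pvIns acc = acc ++ pvNub (xs.filter (fun x => !acc.contains x)) :=
  pvFoldl_ins_eq_nub_aux xs.length xs rfl acc

-- ===== VERDICT (by name: the statement is the Claim_ definition above) =====
theorem get_all_names_predicates_spec : Claim_equal_get_all_names_predicates := by
  intro predicates _
  unfold Spec_get_all_names_predicates get_all_names_predicates get_all_names_predicates_alt
  simp only [pvOuter, pvFoldl_ins_eq_nub, List.contains_nil, Bool.not_false, List.filter_true,
    List.nil_append]
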